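-- pv_equiv track=rewrite | github.com/Valbou/Remplissage-Cheques | somme_lettres/somme_lettres.py | _segmentation
-- ===== SOURCE A (Python) =====
-- def _segmentation(entiere: str) -> list:
--     """Découpe un nombre en sous-nombre de 3 chiffres"""
--     liste_nombre = []
--     seg_num = ""
--     for i in entiere[::-1]:
--         seg_num += i
--         # Création des blocs de 3 chiffres
--         if len(seg_num) == 3:
--             liste_nombre.append("".join(seg_num[::-1]))
--             seg_num = ""
--     if len(seg_num):  # Récupération du reste (inférieur à 3 chiffres)
--         liste_nombre.append("{:0>3}".format("".join(seg_num[::-1])))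
--     return liste_nombre
-- ===== SOURCE B (Python) =====
-- def _segmentation(entiere: str) -> list:
--     blocks = []
--     i = len(entiere)
--     while i > 0:
--         start = max(0, i - 3)
--         blocks.append("{:0>3}".format(entiere[start:i]))
--         i = start
--     return blocks
-- ===== Notes on version B (the rewrite author's own statement) =====
-- stated objective: simpler
-- what changed: B walks an index from len(entiere) down in steps of 3 and slices each 3-char block directly (padding every block, a no-op for full ones), instead of A's char-by-char accumulation over the reversed string with per-block re-reversal.
import Mathlib
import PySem

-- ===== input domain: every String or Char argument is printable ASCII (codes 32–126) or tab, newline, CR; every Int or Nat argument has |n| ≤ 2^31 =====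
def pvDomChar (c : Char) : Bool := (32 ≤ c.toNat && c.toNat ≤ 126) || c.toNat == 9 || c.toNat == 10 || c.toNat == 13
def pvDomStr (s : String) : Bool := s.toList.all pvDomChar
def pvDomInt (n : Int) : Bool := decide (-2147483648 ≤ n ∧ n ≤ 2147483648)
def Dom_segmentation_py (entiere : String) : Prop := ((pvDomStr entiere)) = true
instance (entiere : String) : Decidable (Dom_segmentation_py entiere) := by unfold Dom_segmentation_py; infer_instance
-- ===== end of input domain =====

-- B slices 3-char blocks directly by a descending index instead of A's char-by-char fold over the reversed string; simpler, same cost.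


-- shared helper: "{:0>3}".format(s) — pad on the left with '0' to width 3 (exact for strings of length ≤ 3 and a no-op at length 3)
def pyPad3 (l : List Char) : List Char := List.replicate (3 - l.length) '0' ++ l

-- ===== PORT A =====
-- state = (liste_nombre, seg_num); one fold step of A's for-loop body
def segAstep (st : List (List Char) × List Char) (c : Char) : List (List Char) × List Char :=
  let seg := st.2 ++ [c]
  if seg.length = 3 then (st.1 ++ [seg.reverse], []) else (st.1, seg)

def segA (cs : List Char) : List (List Char) :=
  let st := cs.reverse.foldl segAstep ([], [])
  if st.2.length ≠ 0 then st.1 ++ [pyPad3 st.2.reverse] else st.1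

def segmentation_py (entiere : String) : List String :=
  (segA entiere.toList).map (fun l => String.ofList l)

-- ===== PORT B =====
-- Source B's while-loop as recursion on the index i; 'i + 1 - 3' is Nat subtraction = max(0, i-2),
-- and 'entiere[start:i]' with 0 ≤ start ≤ i ≤ len is exactly (take i).drop start
def segAlt (cs : List Char) : Nat → List (List Char)
  | 0 => []
  | i + 1 =>
    pyPad3 ((cs.take (i + 1)).drop (i + 1 - 3)) :: segAlt cs (i + 1 - 3)
decreasing_by omega

def segmentation_py_alt (entiere : String) : List String :=
  (segAlt entiere.toList entiere.toList.length).map (fun l => String.ofList l)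

-- ===== PRECONDITION & SPEC =====
def Spec_segmentation_py (entiere : String) (out : List String) : Prop := out = segmentation_py_alt entiere
instance (entiere : String) (out : List String) : Decidable (Spec_segmentation_py entiere out) := by unfold Spec_segmentation_py; infer_instance

-- ===== CLAIM (what is proved, stated in full; the proofs are below) =====
def Claim_equal_segmentation_py : Prop := ∀ (entiere : String), Dom_segmentation_py entiere → Spec_segmentation_py entiere (segmentation_py entiere)

-- ===== LEMMAS AND PROOFS =====

theorem foldl_segAstep_acc (l : List Char) (acc : List (List Char)) (seg : List Char) :
    l.foldl segAstep (acc, seg) =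
      (acc ++ (l.foldl segAstep ([], seg)).1, (l.foldl segAstep ([], seg)).2) := by
  induction l generalizing acc seg with
  | nil => simp
  | cons c l ih =>
    simp only [List.foldl, segAstep]
    split_ifs with h
    · simp only [List.nil_append]
      rw [ih (acc ++ [(seg ++ [c]).reverse]) [], ih [(seg ++ [c]).reverse] []]
      simp
    · exact ih acc (seg ++ [c])

theorem foldl_segAstep_short (l : List Char) (h : l.length < 3) :
    l.foldl segAstep ([], []) = ([], l) := by
  match l, h with
  | [], _ => rfl
  | [a], _ => simp [List.foldl, segAstep]
  | [a, b], _ => simp [List.foldl, segAstep]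

theorem foldl_segAstep_block (x y z : Char) (rest : List Char) :
    (z :: y :: x :: rest).foldl segAstep ([], []) = rest.foldl segAstep ([[x, y, z]], []) := by
  simp [List.foldl, segAstep]

theorem segAlt_congr : ∀ (i : Nat) (cs1 cs2 : List Char),
    cs1.take i = cs2.take i → segAlt cs1 i = segAlt cs2 i := by
  intro i
  induction i using Nat.strong_induction_on with
  | _ i ih =>
    match i with
    | 0 => intro _ _ _; simp [segAlt]
    | j + 1 =>
      intro cs1 cs2 h
      simp only [segAlt]
      rw [h]
      congr 1
      apply ih (j + 1 - 3) (by omega)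
      have := congrArg (List.take (j + 1 - 3)) h
      simpa [List.take_take, Nat.min_eq_left (show j - 2 ≤ j + 1 by omega)] using this

theorem segA_eq (n : Nat) : ∀ cs : List Char, cs.length = n → segA cs = segAlt cs n := by
  induction n using Nat.strong_induction_on with
  | _ n ih =>
    intro cs hlen
    by_cases h3 : n < 3
    · -- short cases: 0, 1, 2 characters
      match n, h3, cs, hlen with
      | 0, _, cs, hlen =>
        have : cs = [] := List.eq_nil_of_length_eq_zero hlen
        subst this; simp [segA, segAlt]
      | 1, _, cs, hlen =>
        simp only [segA, segAlt]
        rw [foldl_segAstep_short cs.reverse (by simp [hlen])]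
        simp [hlen, List.take_of_length_le (le_of_eq hlen), segAlt]
      | 2, _, cs, hlen =>
        simp only [segA, segAlt]
        rw [foldl_segAstep_short cs.reverse (by simp [hlen])]
        simp [hlen, List.take_of_length_le (le_of_eq hlen), segAlt]
    · -- n ≥ 3: peel the last 3-char block
      rw [Nat.not_lt] at h3
      set front := cs.take (n - 3) with hfront
      have hsplit : front ++ cs.drop (n - 3) = cs := List.take_append_drop _ _
      have hdlen : (cs.drop (n - 3)).length = 3 := by simp [hlen]; omega
      obtain ⟨x, y, z, hb⟩ := List.length_eq_three.mp hdlen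
      have hflen : front.length = n - 3 := by simp [hfront, hlen]
      have hcs : cs = front ++ [x, y, z] := by rw [← hsplit, hb]
      -- A side
      have hA : segA cs = [x, y, z] :: segA front := by
        simp only [segA]
        rw [hcs]
        simp only [List.reverse_append]
        have : ([x, y, z] : List Char).reverse = [z, y, x] := rfl
        rw [this]
        rw [show ([z, y, x] : List Char) ++ front.reverse = z :: y :: x :: front.reverse from rfl]
        rw [foldl_segAstep_block, foldl_segAstep_acc]
        simp
        split <;> rfl
      -- B side
      have hB : segAlt cs n = [x, y, z] :: segAlt front (n - 3) := by
        obtain ⟨m, hm⟩ : ∃ m, n = m + 1 := ⟨n - 1, by omega⟩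
        subst hm
        simp only [segAlt]
        rw [List.take_of_length_le (le_of_eq hlen), hb]
        congr 1
        apply segAlt_congr
        simp [hfront, List.take_take]
      rw [hA, hB, ih (n - 3) (by omega) front hflen]

-- ===== VERDICT (by name: the statement is the Claim_ definition above) =====
theorem segmentation_py_spec : Claim_equal_segmentation_py := by
  intro entiere _
  unfold Spec_segmentation_py segmentation_py segmentation_py_alt
  rw [segA_eq entiere.toList.length entiere.toList rfl]
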